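-- pv_equiv track=rewrite | github.com/adenis033/BioInformatics | Project_L6/lab6_ex2.py | digest_sequence
-- ===== SOURCE A (Python) =====
-- def revcomp(seq):
--     """Return the reverse complement of a DNA sequence."""
--     return seq.translate(str.maketrans("ACGT", "TGCA"))[::-1]
--
-- def find_cut_positions(dna, site):
--     """Find all cut positions of a site and its reverse complement in the DNA."""
--     cut_positions = set()
--     for s in [site, revcomp(site)]:
--         start = 0
--         while True:
--             pos = dna.find(s, start)
--             if pos == -1:
--                 break
--             cut_positions.add(pos)
--             start = pos + 1
--     return sorted(cut_positions)
--
-- def digest_sequence(dna, site):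
--     """Return fragment lengths after digesting dna with a restriction site."""
--     cut_positions = find_cut_positions(dna, site)
--     if not cut_positions:
--         return [len(dna)]
--     fragments = []
--     prev = 0
--     for cut in cut_positions:
--         fragments.append(cut - prev)
--         prev = cut
--     fragments.append(len(dna) - prev)
--     return fragments
-- ===== SOURCE B (Python) =====
-- def revcomp(seq):
--     """Return the reverse complement of a DNA sequence."""
--     return seq.translate(str.maketrans("ACGT", "TGCA"))[::-1]
--
-- def digest_sequence(dna, site):
--     """Return fragment lengths after digesting dna with a restriction site.
--
--     Streaming one-pass version: walk the sequence once with a running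
--     fragment-length counter, emitting the counter at every cut; the cut
--     positions are never collected, sorted or diffed.
--     """
--     rc = revcomp(site)
--     n = len(dna)
--     frags = []
--     cur = 0
--     for i in range(n + 1):
--         if dna.startswith(site, i) or dna.startswith(rc, i):
--             frags.append(cur)
--             cur = 0
--         if i < n:
--             cur += 1
--     frags.append(cur)
--     return frags
-- ===== Notes on version B (the rewrite author's own statement) =====
-- stated objective: alternative
-- what changed: B never materializes cut positions at all: instead of A's two str.find sweeps collected into a set, sorted, then turned into differences by a prev-accumulator loop, B makes one streaming left-to-right pass over the sequence with a running fragment-length counter that is emitted and reset at each match.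
import Mathlib
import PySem

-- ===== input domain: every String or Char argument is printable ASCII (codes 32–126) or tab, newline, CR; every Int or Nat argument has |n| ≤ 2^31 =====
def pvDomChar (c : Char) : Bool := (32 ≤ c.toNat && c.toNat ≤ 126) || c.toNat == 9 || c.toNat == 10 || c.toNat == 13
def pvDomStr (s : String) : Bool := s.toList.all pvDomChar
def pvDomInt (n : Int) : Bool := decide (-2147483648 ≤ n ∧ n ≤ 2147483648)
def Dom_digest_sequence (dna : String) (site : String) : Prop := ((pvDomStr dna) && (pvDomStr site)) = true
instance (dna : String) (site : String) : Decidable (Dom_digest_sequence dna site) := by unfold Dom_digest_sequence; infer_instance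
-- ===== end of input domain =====

-- B replaces A's find-loops-into-a-set + sort + prev-accumulator loop by one streaming pass
-- with a running fragment-length counter; no cut-position list is ever built.

-- ===== PORT A =====
-- seq.translate(str.maketrans("ACGT", "TGCA")): maketrans maps exactly these four characters
-- and leaves every other character unchanged — exact as a per-character map.
def pvComp (c : Char) : Char :=
  if c = 'A' then 'T' else if c = 'C' then 'G' else if c = 'G' then 'C' else if c = 'T' then 'A' else c

-- revcomp(seq) = seq.translate(...)[::-1]  ([::-1] is reverse)
def pvRevcomp (seq : List Char) : List Char := (seq.map pvComp).reverse

-- the 'while True: pos = dna.find(s, start); …' loop of find_cut_positions; every iteration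
-- moves start past the found position, so dna.length + 2 rounds of fuel always suffice
-- (pvFindLoop_eq below proves the fuel never runs out)
def pvFindLoop (dna s : List Char) (start : Int) (acc : PySem.Set Int) : Nat → PySem.Set Int
  | 0 => acc
  | fuel + 1 =>
    let pos := PySem.Chars.findFrom dna s start
    if pos = -1 then acc else pvFindLoop dna s (pos + 1) (acc.add pos) fuel

def pvFindCutPositions (dna site : List Char) : List Int :=
  let cuts := [site, pvRevcomp site].foldl
    (fun acc s => pvFindLoop dna s 0 acc (dna.length + 2)) PySem.Set.empty
  PySem.List.sorted cuts (fun x => x)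

def digest_sequence (dna : String) (site : String) : List Int :=
  let cuts := pvFindCutPositions dna.toList site.toList
  if cuts = [] then [(dna.toList.length : Int)]
  else
    let r := cuts.foldl (fun (p : List Int × Int) cut => (p.1 ++ [cut - p.2], cut)) ([], 0)
    r.1 ++ [(dna.toList.length : Int) - r.2]

-- ===== PORT B =====
-- one iteration of B's for-loop: dna.startswith(s, i) for 0 ≤ i ≤ len(dna) is exactly
-- "s is a prefix of dna[i:]"; state = (frags, cur)
def pvScanStep (d site rc : List Char) (n : Nat) (p : List Int × Int) (i : Nat) : List Int × Int :=
  let p' := if PySem.Chars.startswith (d.drop i) site || PySem.Chars.startswith (d.drop i) rc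
            then (p.1 ++ [p.2], (0 : Int)) else p
  if i < n then (p'.1, p'.2 + 1) else p'

def digest_sequence_alt (dna : String) (site : String) : List Int :=
  let d := dna.toList
  let n := d.length
  let st := (List.range (n + 1)).foldl (pvScanStep d site.toList (pvRevcomp site.toList) n) ([], 0)
  st.1 ++ [st.2]

-- ===== PRECONDITION & SPEC =====
def Spec_digest_sequence (dna : String) (site : String) (out : List Int) : Prop := out = digest_sequence_alt dna site
instance (dna : String) (site : String) (out : List Int) : Decidable (Spec_digest_sequence dna site out) := by unfold Spec_digest_sequence; infer_instance

-- ===== CLAIM (what is proved, stated in full; the proofs are below) =====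
def Claim_equal_digest_sequence : Prop := ∀ (dna : String) (site : String), Dom_digest_sequence dna site → Spec_digest_sequence dna site (digest_sequence dna site)

-- ===== LEMMAS AND PROOFS =====

-- dna.find(s, start) with start = len(dna) + 1 is -1 (PySem keeps CPython's past-the-end rule)
theorem pvFindFrom_past (d s : List Char) :
    PySem.Chars.findFrom d s ((d.length : Int) + 1) = -1 := by
  simp only [PySem.Chars.findFrom]
  split_ifs with h1 h2 <;> omega

theorem pvPrefixDropInfix (a d : List Char) (k i : Nat) (hk : k ≤ i) (h : a <+: d.drop i) :
    a <:+: d.drop k := by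
  have hdd : (d.drop k).drop (i - k) = d.drop i := by
    rw [List.drop_drop]; congr 1; omega
  rw [← hdd] at h
  obtain ⟨t, ht⟩ := h
  exact ⟨(d.drop k).take (i - k), t, by rw [List.append_assoc, ht, List.take_append_drop]⟩

-- A's while-loop adds, in increasing order, exactly the positions i ∈ [k, len(dna)]
-- at which s is a prefix of dna[i:]
theorem pvFindLoop_eq (d s : List Char) :
    ∀ (fuel k : Nat) (acc : PySem.Set Int), k ≤ d.length + 1 → d.length + 2 - k ≤ fuel →
    pvFindLoop d s (k : Int) acc fuel =
      acc.update (List.map (fun i : Nat => (i : Int))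
        ((List.range' k (d.length + 1 - k)).filter
          (fun i => PySem.Chars.startswith (d.drop i) s))) := by
  intro fuel
  induction fuel with
  | zero => intro k acc hk hf; omega
  | succ fuel ih =>
    intro k acc hk hf
    rcases Nat.lt_or_ge k (d.length + 1) with hlt | hge
    · have hk' : k ≤ d.length := by omega
      by_cases hneg : PySem.Chars.findFrom d s (k : Int) = -1
      · have hnin := (PySem.Chars.findFrom_natCast_eq_neg_one_iff d s k hk').mp hneg
        have hfil : (List.range' k (d.length + 1 - k)).filter
            (fun i => PySem.Chars.startswith (d.drop i) s) = [] := by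
          rw [List.filter_eq_nil_iff]
          intro i hi
          rw [List.mem_range'_1] at hi
          simp only [PySem.Chars.startswith_iff]
          intro hpre
          exact hnin (pvPrefixDropInfix s d k i hi.1 hpre)
        simp [pvFindLoop, hneg, hfil, PySem.Set.update_nil]
      · obtain ⟨hkle, hpre, hmin⟩ := PySem.Chars.findFrom_natCast_spec d s k hk' hneg
        set pos := PySem.Chars.findFrom d s (k : Int) with hpos
        set m := pos.toNat with hm
        have hposm : pos = (m : Int) := by
          have h0 : (0 : Int) ≤ pos := le_trans (by exact_mod_cast Nat.zero_le k) hkle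
          rw [hm, Int.toNat_of_nonneg h0]
        have hkm : k ≤ m := by omega
        have hmlen : m ≤ d.length := by
          by_contra hgt
          push_neg at hgt
          have hnil : d.drop m = [] := List.drop_eq_nil_of_le (by omega)
          rw [hnil] at hpre
          have hs : s = [] := List.prefix_nil.mp hpre
          exact hmin k le_rfl (by omega) (by rw [hs]; exact List.nil_prefix)
        have hsplit : List.range' k (d.length + 1 - k) =
            List.range' k (m - k) ++ m :: List.range' (m + 1) (d.length - m) := by
          have h1 : List.range' k (m - k) ++ List.range' (k + 1 * (m - k)) (d.length + 1 - m) =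
              List.range' k ((m - k) + (d.length + 1 - m)) := List.range'_append
          have h2 : k + 1 * (m - k) = m := by omega
          have h3 : (m - k) + (d.length + 1 - m) = d.length + 1 - k := by omega
          rw [h2, h3] at h1
          rw [← h1]
          congr 1
          have h4 : d.length + 1 - m = (d.length - m) + 1 := by omega
          rw [h4, List.range'_succ]
        have hfil1 : (List.range' k (m - k)).filter
            (fun i => PySem.Chars.startswith (d.drop i) s) = [] := by
          rw [List.filter_eq_nil_iff]
          intro i hi
          rw [List.mem_range'_1] at hi
          simp only [PySem.Chars.startswith_iff]
          intro hpre'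
          exact hmin i hi.1 (by omega) hpre'
        have hhitm : PySem.Chars.startswith (d.drop m) s = true :=
          (PySem.Chars.startswith_iff _ _).mpr hpre
        have hstep : pvFindLoop d s ((k : Nat) : Int) acc (fuel + 1) =
            pvFindLoop d s ((m : Int) + 1) (PySem.Set.add acc (m : Int)) fuel := by
          show (if PySem.Chars.findFrom d s ((k : Nat) : Int) = -1 then acc
                else pvFindLoop d s (PySem.Chars.findFrom d s ((k : Nat) : Int) + 1)
                  (PySem.Set.add acc (PySem.Chars.findFrom d s ((k : Nat) : Int))) fuel) = _
          rw [← hpos, if_neg hneg, hposm]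
        clear_value pos m
        rw [hstep, hsplit, List.filter_append, hfil1, List.nil_append, List.filter_cons,
          hhitm]
        simp only [if_true, List.map_cons, PySem.Set.update_cons]
        have hcast : ((m : Int) + 1) = ((m + 1 : Nat) : Int) := by push_cast; ring
        have harg : d.length - m = d.length + 1 - (m + 1) := by omega
        rw [hcast, harg, ih (m + 1) (PySem.Set.add acc (m : Int)) (by omega) (by omega)]
    · have hk1 : k = d.length + 1 := by omega
      subst hk1
      have hpast : PySem.Chars.findFrom d s ((d.length + 1 : Nat) : Int) = -1 := by
        push_cast
        exact pvFindFrom_past d s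
      show (if PySem.Chars.findFrom d s ((d.length + 1 : Nat) : Int) = -1 then acc
            else pvFindLoop d s _ _ fuel) = _
      rw [if_pos hpast]
      simp [PySem.Set.update_nil]

-- the sorted deduplicated union of A's two occurrence sweeps is the single filtered index scan
theorem pvCuts_eq (d site : List Char) :
    pvFindCutPositions d site =
      List.map (fun i : Nat => (i : Int))
        ((List.range (d.length + 1)).filter
          (fun i => PySem.Chars.startswith (d.drop i) site
                 || PySem.Chars.startswith (d.drop i) (pvRevcomp site))) := by
  have hloop : ∀ (s : List Char) (acc : PySem.Set Int),
      pvFindLoop d s 0 acc (d.length + 2) =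
        acc.update (List.map (fun i : Nat => (i : Int))
          ((List.range (d.length + 1)).filter
            (fun i => PySem.Chars.startswith (d.drop i) s))) := by
    intro s acc
    have := pvFindLoop_eq d s (d.length + 2) 0 acc (by omega) (by omega)
    simpa [List.range_eq_range'] using this
  unfold pvFindCutPositions
  simp only [List.foldl_cons, List.foldl_nil, hloop, PySem.Set.empty_eq,
    PySem.Set.update_nil_left]
  apply PySem.List.sorted_id_eq_of_perm_of_pairwise
  · rw [List.perm_ext_iff_of_nodup]
    · intro x
      simp only [PySem.Set.mem_update, PySem.Set.mem_ofList, List.mem_map, List.mem_filter,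
        List.mem_range, Bool.or_eq_true]
      constructor
      · rintro ⟨i, ⟨hi, hp⟩, rfl⟩
        rcases hp with h | h
        · exact Or.inl ⟨i, ⟨hi, h⟩, rfl⟩
        · exact Or.inr ⟨i, ⟨hi, h⟩, rfl⟩
      · rintro (⟨i, ⟨hi, h⟩, rfl⟩ | ⟨i, ⟨hi, h⟩, rfl⟩)
        · exact ⟨i, ⟨hi, Or.inl h⟩, rfl⟩
        · exact ⟨i, ⟨hi, Or.inr h⟩, rfl⟩
    · exact ((List.nodup_range).filter _).map (fun a b h => by exact_mod_cast h)
    · exact PySem.Set.nodup_update _ _ (PySem.Set.nodup_ofList _)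
  · refine List.Pairwise.map _ (fun a b h => ?_) ((List.pairwise_lt_range).filter _)
    exact le_of_lt (by exact_mod_cast h)

-- A's prev-accumulator fragment loop, closed by the final append, as a zip of differences
theorem pvFrag_eq (z : Int) :
    ∀ (C acc : List Int) (prev : Int),
    (C.foldl (fun (p : List Int × Int) cut => (p.1 ++ [cut - p.2], cut)) (acc, prev)).1
      ++ [z - (C.foldl (fun (p : List Int × Int) cut => (p.1 ++ [cut - p.2], cut)) (acc, prev)).2]
    = acc ++ List.zipWith (fun a b => b - a) (prev :: C) (C ++ [z]) := by
  intro C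
  induction C with
  | nil => intro acc prev; simp
  | cons c C ih =>
    intro acc prev
    simpa [List.foldl_cons] using ih (acc ++ [c - prev]) c

-- B's streaming pass over the tail range' k m: from state (acc, (k : Int) - prev) it produces
-- acc ++ the pairwise differences of prev :: (cuts in [k, len]) ++ [len]
theorem pvScan_eq (d site rc : List Char) :
    ∀ (m k : Nat) (acc : List Int) (prev : Int), k + m = d.length + 1 → k ≤ d.length →
    ((List.range' k m).foldl (pvScanStep d site rc d.length) (acc, (k : Int) - prev)).1
      ++ [((List.range' k m).foldl (pvScanStep d site rc d.length) (acc, (k : Int) - prev)).2] =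
    acc ++ List.zipWith (fun a b => b - a)
      (prev :: List.map (fun i : Nat => (i : Int))
        ((List.range' k m).filter
          (fun i => PySem.Chars.startswith (d.drop i) site || PySem.Chars.startswith (d.drop i) rc)))
      (List.map (fun i : Nat => (i : Int))
        ((List.range' k m).filter
          (fun i => PySem.Chars.startswith (d.drop i) site || PySem.Chars.startswith (d.drop i) rc))
        ++ [(d.length : Int)]) := by
  intro m
  induction m with
  | zero => intro k acc prev hk hkle; omega
  | succ m ih =>
    intro k acc prev hk hkle
    rw [List.range'_succ, List.foldl_cons, List.filter_cons]
    by_cases hq : (PySem.Chars.startswith (d.drop k) site || PySem.Chars.startswith (d.drop k) rc) = true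
    · rw [if_pos hq]
      rcases Nat.lt_or_ge k d.length with hkn | hkn
      · have hstep : pvScanStep d site rc d.length (acc, (k : Int) - prev) k =
            (acc ++ [(k : Int) - prev], ((k + 1 : Nat) : Int) - (k : Int)) := by
          simp only [pvScanStep, hq, if_true, if_pos hkn]
          push_cast
          norm_num
        rw [hstep, ih (k + 1) (acc ++ [(k : Int) - prev]) (k : Int) (by omega) (by omega)]
        simp
      · have hkd : k = d.length := by omega
        have hm0 : m = 0 := by omega
        subst hm0
        have hstep : pvScanStep d site rc d.length (acc, (k : Int) - prev) k =
            (acc ++ [(k : Int) - prev], (0 : Int)) := by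
          simp only [pvScanStep, hq, if_true, if_neg (show ¬ k < d.length by omega)]
        rw [hstep]
        simp [List.range', hkd]
    · rw [if_neg hq]
      rcases Nat.lt_or_ge k d.length with hkn | hkn
      · have hstep : pvScanStep d site rc d.length (acc, (k : Int) - prev) k =
            (acc, ((k + 1 : Nat) : Int) - prev) := by
          simp only [pvScanStep, hq, Bool.false_eq_true, if_false, if_pos hkn]
          refine Prod.ext rfl ?_
          push_cast
          ring
        rw [hstep, ih (k + 1) acc prev (by omega) (by omega)]
      · have hkd : k = d.length := by omega
        have hm0 : m = 0 := by omega
        subst hm0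
        have hstep : pvScanStep d site rc d.length (acc, (k : Int) - prev) k =
            (acc, (k : Int) - prev) := by
          simp only [pvScanStep, hq, Bool.false_eq_true, if_false,
            if_neg (show ¬ k < d.length by omega)]
        rw [hstep]
        simp [List.range', hkd]

-- ===== VERDICT (by name: the statement is the Claim_ definition above) =====
theorem digest_sequence_spec : Claim_equal_digest_sequence := by
  intro dna site _
  show digest_sequence dna site = digest_sequence_alt dna site
  simp only [digest_sequence, digest_sequence_alt]
  rw [pvCuts_eq]
  have hB := pvScan_eq dna.toList site.toList (pvRevcomp site.toList)
    (dna.toList.length + 1) 0 [] 0 (by omega) (by omega)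
  simp only [Nat.cast_zero, sub_zero, List.nil_append] at hB
  rw [List.range_eq_range', hB]
  by_cases hC : List.map (fun i : Nat => (i : Int))
      ((List.range' 0 (dna.toList.length + 1)).filter
        (fun i => PySem.Chars.startswith (dna.toList.drop i) site.toList
               || PySem.Chars.startswith (dna.toList.drop i) (pvRevcomp site.toList))) = []
  · rw [if_pos hC, hC]
    simp
  · rw [if_neg hC]
    simpa using pvFrag_eq ((dna.toList.length : Int)) _ [] 0
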